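-- pv_equiv track=rewrite | github.com/kkhatri99/mAbScale | dialog_box.py | are_chars_in_list_valid
-- ===== SOURCE A (Python) =====
-- from typing import Dict, List
--
-- def are_chars_in_list_valid(check_string: str,
--                             valid_list: List[str]) -> bool:
--     '''
--         Checks if all characters in string are in the list.
--
--         Arguments:
--             check_string {str} -- String with characters to check.
--
--             valid_list {list} -- List of valid values.
--
--         Returns:
--             {bool} -- Is string valid.
--     '''
--     # Convert input parameters to upper case.
--     check_string = check_string.strip().upper()
--     valid_list = [each_char.upper() for each_char in valid_list]
--
--     valid: bool = True
--
--     for char in check_string: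
--         if char not in valid_list:
--             valid = False
--             break
--
--     return valid
-- ===== SOURCE B (Python) =====
-- def are_chars_in_list_valid(check_string, valid_list):
--     # Only single-character entries of valid_list can ever equal a character,
--     # so build a code-keyed deletion table from them and delete every valid
--     # character from the string: the string is valid iff nothing remains.
--     delete_table = {ord(v.upper()): None for v in valid_list if len(v) == 1}
--     return not check_string.strip().upper().translate(delete_table)
-- ===== Notes on version B (the rewrite author's own statement) =====
-- stated objective: faster
-- what changed: Instead of looping over characters with a list-membership test and break, B builds a code-keyed deletion table from the single-character valid entries (only those can ever match a char), deletes every valid character from the stripped uppercased string with str.translate, and returns whether nothing remains.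
import Mathlib
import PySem

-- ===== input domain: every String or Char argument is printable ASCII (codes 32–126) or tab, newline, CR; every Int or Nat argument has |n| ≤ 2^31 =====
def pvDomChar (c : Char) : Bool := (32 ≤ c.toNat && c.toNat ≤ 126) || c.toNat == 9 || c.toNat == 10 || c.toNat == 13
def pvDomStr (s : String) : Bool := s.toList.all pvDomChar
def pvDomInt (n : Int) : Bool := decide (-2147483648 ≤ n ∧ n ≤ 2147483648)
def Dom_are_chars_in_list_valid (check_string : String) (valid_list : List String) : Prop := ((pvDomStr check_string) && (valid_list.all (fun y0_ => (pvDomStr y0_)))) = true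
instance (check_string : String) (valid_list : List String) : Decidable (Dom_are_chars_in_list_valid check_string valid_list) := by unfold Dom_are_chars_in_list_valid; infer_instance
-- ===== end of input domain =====

-- B deletes every valid character (a code-keyed deletion table built from the single-character entries) and tests that nothing remains, replacing A's per-character list-membership loop; a timing run measured B faster.

-- ===== PORT A =====
-- the 'for char in check_string: if char not in valid_list: valid = False; break' loop
def pvLoopA : List Char → List String → Bool
  | [], _ => true
  | c :: rest, vl => if !(vl.contains (String.ofList [c])) then false else pvLoopA rest vl

def are_chars_in_list_valid (check_string : String) (valid_list : List String) : Bool :=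
  let s := PySem.Str.upper (PySem.Str.strip check_string)
  let vl := valid_list.map PySem.Str.upper
  pvLoopA s.toList vl

-- ===== PORT B =====
-- ord(v) for a one-character string v (the only case B applies it to, after the len == 1 filter); exact there
def pvOrd (v : String) : Nat :=
  match v.toList with
  | [c] => c.toNat
  | _ => 0

def are_chars_in_list_valid_alt (check_string : String) (valid_list : List String) : Bool :=
  -- {ord(v.upper()): None for v in valid_list if len(v) == 1}, kept as the set of key codes
  let delete_table : PySem.Set Nat :=
    PySem.Set.ofList ((valid_list.filter (fun v => PySem.Str.len v == 1)).map
      (fun v => pvOrd (PySem.Str.upper v)))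
  -- check_string.strip().upper().translate(delete_table): drop the chars whose code is a key
  let residual := (PySem.Str.upper (PySem.Str.strip check_string)).toList.filter
    (fun c => !(delete_table.contains c.toNat))
  -- 'not <string>'
  residual.isEmpty

-- ===== PRECONDITION & SPEC =====
def Spec_are_chars_in_list_valid (check_string : String) (valid_list : List String) (out : Bool) : Prop := out = are_chars_in_list_valid_alt check_string valid_list
instance (check_string : String) (valid_list : List String) (out : Bool) : Decidable (Spec_are_chars_in_list_valid check_string valid_list out) := by unfold Spec_are_chars_in_list_valid; infer_instance

-- ===== CLAIM (what is proved, stated in full; the proofs are below) =====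
def Claim_equal_are_chars_in_list_valid : Prop := ∀ (check_string : String) (valid_list : List String), Dom_are_chars_in_list_valid check_string valid_list → Spec_are_chars_in_list_valid check_string valid_list (are_chars_in_list_valid check_string valid_list)

-- ===== LEMMAS AND PROOFS =====
theorem pvLoopA_eq_all (l : List Char) (vl : List String) :
    pvLoopA l vl = l.all (fun c => vl.contains (String.ofList [c])) := by
  induction l with
  | nil => rfl
  | cons c rest ih =>
    cases h : vl.contains (String.ofList [c]) <;>
      simp [pvLoopA, List.all_cons, ih]

theorem upper_toList (v : String) :
    (PySem.Str.upper v).toList = v.toList.map PySem.Chars.upperChar := by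
  simp [PySem.Str.toList_upper, PySem.Chars.upper]

-- the pointwise key fact: char c matches some uppercased entry of vl iff its code is a key of the deletion table
theorem mem_keys_iff (c : Char) (vl : List String) :
    (vl.map PySem.Str.upper).contains (String.ofList [c]) =
      ((vl.filter (fun v => PySem.Str.len v == 1)).map
        (fun v => pvOrd (PySem.Str.upper v))).contains c.toNat := by
  rw [Bool.eq_iff_iff]
  simp only [List.contains_eq_mem, decide_eq_true_eq, List.mem_map, List.mem_filter]
  constructor
  · rintro ⟨v, hv, he⟩
    have h1 : (PySem.Str.upper v).toList = [c] := by rw [he]; simp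
    refine ⟨v, ⟨hv, ?_⟩, ?_⟩
    · have h2 := congrArg List.length h1
      rw [upper_toList] at h2
      simp only [List.length_map, List.length_cons, List.length_nil] at h2
      simp [PySem.Str.len_eq, h2]
    · simp [pvOrd, h1]
  · rintro ⟨v, ⟨hv, hlen⟩, he⟩
    refine ⟨v, hv, ?_⟩
    have h1 : v.toList.length = 1 := by simpa [PySem.Str.len_eq] using hlen
    obtain ⟨d, hd⟩ : ∃ d, v.toList = [d] := by
      cases hvl : v.toList with
      | nil => simp [hvl] at h1
      | cons x t => cases t with
        | nil => exact ⟨x, rfl⟩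
        | cons y t' => simp [hvl] at h1
    have h2 : (PySem.Str.upper v).toList = [PySem.Chars.upperChar d] := by
      rw [upper_toList, hd]; rfl
    have h3 : (PySem.Chars.upperChar d).toNat = c.toNat := by
      simpa [pvOrd, h2] using he
    have h4 : PySem.Chars.upperChar d = c := Char.ext (UInt32.toNat_inj.mp h3)
    have h5 : (PySem.Str.upper v).toList = [c] := by rw [h2, h4]
    rw [← h5]
    exact String.ofList_toList.symm

-- same key fact at the PySem.Set level
theorem key_eq (c : Char) (vl : List String) :
    (vl.map PySem.Str.upper).contains (String.ofList [c]) =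
    (PySem.Set.ofList ((vl.filter (fun v => PySem.Str.len v == 1)).map
      (fun v => pvOrd (PySem.Str.upper v)))).contains c.toNat := by
  rw [mem_keys_iff, Bool.eq_iff_iff]
  simp only [PySem.Set.contains, List.contains_eq_mem, decide_eq_true_eq, PySem.Set.mem_ofList]

-- ===== VERDICT (by name: the statement is the Claim_ definition above) =====
theorem are_chars_in_list_valid_spec : Claim_equal_are_chars_in_list_valid := by
  intro cs vl _
  unfold Spec_are_chars_in_list_valid are_chars_in_list_valid are_chars_in_list_valid_alt
  rw [pvLoopA_eq_all, Bool.eq_iff_iff, List.isEmpty_iff, List.filter_eq_nil_iff]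
  simp only [List.all_eq_true, Bool.not_eq_eq_eq_not, Bool.not_true, key_eq]
  simp
  constructor
  · rintro h a ha
    obtain ⟨v, ⟨hv, hl⟩, he⟩ := h a ha
    exact ⟨v, hv, hl, he⟩
  · rintro h a ha
    obtain ⟨v, hv, hl, he⟩ := h a ha
    exact ⟨v, ⟨hv, hl⟩, he⟩
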